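-- pv_equiv track=rewrite | github.com/avival69/watermarking | app.py | hamming74_encode
-- ===== SOURCE A (Python) =====
-- from typing import Dict, List, Optional, Sequence, Tuple
--
-- def hamming74_encode(bits: Sequence[int]) -> List[int]:
--     encoded: List[int] = []
--     padded = list(bits)
--     remainder = len(padded) % 4
--     if remainder:
--         padded.extend([0] * (4 - remainder))
--
--     for i in range(0, len(padded), 4):
--         d1, d2, d3, d4 = (padded[i + j] & 1 for j in range(4))
--         p1 = d1 ^ d2 ^ d4
--         p2 = d1 ^ d3 ^ d4
--         p3 = d2 ^ d3 ^ d4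
--         encoded.extend([p1, p2, d1, p3, d2, d3, d4])
--     return encoded
-- ===== SOURCE B (Python) =====
-- from typing import List, Sequence
--
-- # Hamming(7,4) codebook: _TABLE[v] is the codeword [p1, p2, d1, p3, d2, d3, d4]
-- # for the nibble v = d1 d2 d3 d4 (most significant bit first).
-- _TABLE = [
--     [0, 0, 0, 0, 0, 0, 0],
--     [1, 1, 0, 1, 0, 0, 1],
--     [0, 1, 0, 1, 0, 1, 0],
--     [1, 0, 0, 0, 0, 1, 1],
--     [1, 0, 0, 1, 1, 0, 0],
--     [0, 1, 0, 0, 1, 0, 1],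
--     [1, 1, 0, 0, 1, 1, 0],
--     [0, 0, 0, 1, 1, 1, 1],
--     [1, 1, 1, 0, 0, 0, 0],
--     [0, 0, 1, 1, 0, 0, 1],
--     [1, 0, 1, 1, 0, 1, 0],
--     [0, 1, 1, 0, 0, 1, 1],
--     [0, 1, 1, 1, 1, 0, 0],
--     [1, 0, 1, 0, 1, 0, 1],
--     [0, 0, 1, 0, 1, 1, 0],
--     [1, 1, 1, 1, 1, 1, 1],
-- ]
--
-- def hamming74_encode(bits: Sequence[int]) -> List[int]:
--     padded = list(bits)
--     remainder = len(padded) % 4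
--     if remainder:
--         padded.extend([0] * (4 - remainder))
--     out: List[int] = []
--     it = iter(padded)
--     for a, b, c, d in zip(it, it, it, it):
--         out += _TABLE[((a & 1) << 3) | ((b & 1) << 2) | ((c & 1) << 1) | (d & 1)]
--     return out
-- ===== Notes on version B (the rewrite author's own statement) =====
-- stated objective: alternative
-- what changed: Replaces the per-block parity XOR computation with a precomputed 16-entry codebook indexed by the masked nibble, and consumes the padded input four elements at a time (zip of one iterator) instead of indexing by range(0, len, 4).
import Mathlib
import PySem

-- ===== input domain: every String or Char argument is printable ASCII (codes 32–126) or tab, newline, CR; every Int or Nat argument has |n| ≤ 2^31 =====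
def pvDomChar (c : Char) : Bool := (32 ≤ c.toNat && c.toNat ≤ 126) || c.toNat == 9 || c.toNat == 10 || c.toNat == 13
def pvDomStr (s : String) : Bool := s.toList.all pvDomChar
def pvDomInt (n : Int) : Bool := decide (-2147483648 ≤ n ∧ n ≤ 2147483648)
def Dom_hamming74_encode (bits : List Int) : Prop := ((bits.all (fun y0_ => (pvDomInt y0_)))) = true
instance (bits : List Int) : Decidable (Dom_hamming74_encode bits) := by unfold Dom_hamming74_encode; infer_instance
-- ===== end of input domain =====

-- B replaces the per-block XOR parity computation with a precomputed 16-entry codebook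
-- indexed by the masked nibble, consuming the padded input four elements at a time.

-- ===== PORT A =====
def hamming74_encode (bits : List Int) : List Int :=
  let padded : List Int :=
    if bits.length % 4 ≠ 0 then bits ++ List.replicate (4 - bits.length % 4) 0 else bits
  (PySem.List.pyRange 0 (padded.length : Int) 4).foldl
    (fun encoded i =>
      let d1 := PySem.Int.band (PySem.List.pyGetD padded (i + 0) 0) 1
      let d2 := PySem.Int.band (PySem.List.pyGetD padded (i + 1) 0) 1
      let d3 := PySem.Int.band (PySem.List.pyGetD padded (i + 2) 0) 1
      let d4 := PySem.Int.band (PySem.List.pyGetD padded (i + 3) 0) 1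
      let p1 := PySem.Int.bxor (PySem.Int.bxor d1 d2) d4
      let p2 := PySem.Int.bxor (PySem.Int.bxor d1 d3) d4
      let p3 := PySem.Int.bxor (PySem.Int.bxor d2 d3) d4
      encoded ++ [p1, p2, d1, p3, d2, d3, d4]) []

-- ===== PORT B =====
def hammingTable : List (List Int) :=
  [[0, 0, 0, 0, 0, 0, 0],
   [1, 1, 0, 1, 0, 0, 1],
   [0, 1, 0, 1, 0, 1, 0],
   [1, 0, 0, 0, 0, 1, 1],
   [1, 0, 0, 1, 1, 0, 0],
   [0, 1, 0, 0, 1, 0, 1],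
   [1, 1, 0, 0, 1, 1, 0],
   [0, 0, 0, 1, 1, 1, 1],
   [1, 1, 1, 0, 0, 0, 0],
   [0, 0, 1, 1, 0, 0, 1],
   [1, 0, 1, 1, 0, 1, 0],
   [0, 1, 1, 0, 0, 1, 1],
   [0, 1, 1, 1, 1, 0, 0],
   [1, 0, 1, 0, 1, 0, 1],
   [0, 0, 1, 0, 1, 1, 0],
   [1, 1, 1, 1, 1, 1, 1]]

-- 'for a,b,c,d in zip(it,it,it,it)': consume four elements at a time, stop when fewer remain
def encodeChunks : List Int → List Int
  | a :: b :: c :: d :: rest =>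
      hammingTable.getD
        ((PySem.Int.bor
            (PySem.Int.bor
              (PySem.Int.bor ((PySem.Int.band a 1) <<< 3) ((PySem.Int.band b 1) <<< 2))
              ((PySem.Int.band c 1) <<< 1))
            (PySem.Int.band d 1)).toNat) []
        ++ encodeChunks rest
  | _ => []

def hamming74_encode_alt (bits : List Int) : List Int :=
  let padded : List Int :=
    if bits.length % 4 ≠ 0 then bits ++ List.replicate (4 - bits.length % 4) 0 else bits
  encodeChunks padded

-- ===== PRECONDITION & SPEC =====
def Spec_hamming74_encode (bits : List Int) (out : List Int) : Prop := out = hamming74_encode_alt bits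
instance (bits : List Int) (out : List Int) : Decidable (Spec_hamming74_encode bits out) := by unfold Spec_hamming74_encode; infer_instance

-- ===== CLAIM (what is proved, stated in full; the proofs are below) =====
def Claim_equal_hamming74_encode : Prop := ∀ (bits : List Int), Dom_hamming74_encode bits → Spec_hamming74_encode bits (hamming74_encode bits)

-- ===== LEMMAS AND PROOFS =====

-- the body of A's loop, as a function of the block start index
def pvBlock (pad : List Int) (i : Int) : List Int :=
  let d1 := PySem.Int.band (PySem.List.pyGetD pad (i + 0) 0) 1
  let d2 := PySem.Int.band (PySem.List.pyGetD pad (i + 1) 0) 1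
  let d3 := PySem.Int.band (PySem.List.pyGetD pad (i + 2) 0) 1
  let d4 := PySem.Int.band (PySem.List.pyGetD pad (i + 3) 0) 1
  let p1 := PySem.Int.bxor (PySem.Int.bxor d1 d2) d4
  let p2 := PySem.Int.bxor (PySem.Int.bxor d1 d3) d4
  let p3 := PySem.Int.bxor (PySem.Int.bxor d2 d3) d4
  [p1, p2, d1, p3, d2, d3, d4]

theorem pv_and_one (x : Int) : PySem.Int.band x 1 = 0 ∨ PySem.Int.band x 1 = 1 := by
  rw [PySem.Int.band_one]
  unfold PySem.Int.mod
  rw [Int.fmod_eq_emod_of_nonneg x (by norm_num)]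
  omega

theorem pv_getshift (x : Int) (xs : List Int) (i : Int) (hi : 0 ≤ i) :
    PySem.List.pyGetD (x :: xs) (i + 1) 0 = PySem.List.pyGetD xs i 0 := by
  obtain ⟨n, rfl⟩ := Int.eq_ofNat_of_zero_le hi
  have h : ((n : Int) + 1) = ((n + 1 : Nat) : Int) := by push_cast; ring
  rw [h, PySem.List.pyGetD_natCast, PySem.List.pyGetD_natCast, List.getD_cons_succ]

theorem pvBlock_shift (x : Int) (xs : List Int) (i : Int) (hi : 0 ≤ i) :
    pvBlock (x :: xs) (i + 1) = pvBlock xs i := by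
  simp only [pvBlock]
  have h0 : i + 1 + 0 = (i + 0) + 1 := by ring
  have h1 : i + 1 + 1 = (i + 1) + 1 := by ring
  have h2 : i + 1 + 2 = (i + 2) + 1 := by ring
  have h3 : i + 1 + 3 = (i + 3) + 1 := by ring
  rw [h0, h1, h2, h3, pv_getshift x xs (i + 0) (by omega), pv_getshift x xs (i + 1) (by omega),
      pv_getshift x xs (i + 2) (by omega), pv_getshift x xs (i + 3) (by omega)]

theorem pvBlock_chunk (a b c d : Int) (rest : List Int) :
    pvBlock (a :: b :: c :: d :: rest) 0 =
      hammingTable.getD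
        ((PySem.Int.bor
            (PySem.Int.bor
              (PySem.Int.bor ((PySem.Int.band a 1) <<< 3) ((PySem.Int.band b 1) <<< 2))
              ((PySem.Int.band c 1) <<< 1))
            (PySem.Int.band d 1)).toNat) [] := by
  have e0 : PySem.List.pyGetD (a :: b :: c :: d :: rest) ((0 : Int) + 0) 0 = a := by
    norm_num [PySem.List.pyGetD_zero_cons]
  have e1 : PySem.List.pyGetD (a :: b :: c :: d :: rest) ((0 : Int) + 1) 0 = b := by
    have h : ((0 : Int) + 1) = ((1 : Nat) : Int) := by norm_num
    rw [h, PySem.List.pyGetD_natCast]; rfl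
  have e2 : PySem.List.pyGetD (a :: b :: c :: d :: rest) ((0 : Int) + 2) 0 = c := by
    have h : ((0 : Int) + 2) = ((2 : Nat) : Int) := by norm_num
    rw [h, PySem.List.pyGetD_natCast]; rfl
  have e3 : PySem.List.pyGetD (a :: b :: c :: d :: rest) ((0 : Int) + 3) 0 = d := by
    have h : ((0 : Int) + 3) = ((3 : Nat) : Int) := by norm_num
    rw [h, PySem.List.pyGetD_natCast]; rfl
  simp only [pvBlock]
  rw [e0, e1, e2, e3]
  rcases pv_and_one a with ha | ha <;> rcases pv_and_one b with hb | hb <;>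
    rcases pv_and_one c with hc | hc <;> rcases pv_and_one d with hd | hd <;>
    rw [ha, hb, hc, hd] <;> decide

theorem pv_flatMap_chunks :
    ∀ (n : Nat) (pad : List Int), pad.length = 4 * n →
      ((List.range n).map (fun k : Nat => (0 : Int) + 4 * (k : Int))).flatMap (pvBlock pad) =
        encodeChunks pad := by
  intro n
  induction n with
  | zero =>
    intro pad h
    have hnil : pad = [] := List.eq_nil_of_length_eq_zero (by omega)
    subst hnil; rfl
  | succ m ih =>
    intro pad h
    match pad, h with
    | a :: b :: c :: d :: rest, h =>
      have hr : rest.length = 4 * m := by simp at h; omega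
      rw [List.range_succ_eq_map]
      simp only [List.map_cons, List.map_map, List.flatMap_cons]
      have hhead : (0 : Int) + 4 * ((0 : Nat) : Int) = 0 := by norm_num
      rw [hhead, pvBlock_chunk]
      have htail :
          ((List.range m).map ((fun k : Nat => (0 : Int) + 4 * (k : Int)) ∘ Nat.succ)).flatMap
              (pvBlock (a :: b :: c :: d :: rest)) =
            ((List.range m).map (fun k : Nat => (0 : Int) + 4 * (k : Int))).flatMap (pvBlock rest) := by
        rw [List.flatMap_map, List.flatMap_map]
        apply List.flatMap_congr
        intro k _
        have h4 : (0 : Int) + 4 * ((Nat.succ k : Nat) : Int)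
            = ((((0 + 4 * (k : Int)) + 1) + 1) + 1) + 1 := by push_cast; ring
        rw [Function.comp_apply, h4,
            pvBlock_shift a _ _ (by positivity),
            pvBlock_shift b _ _ (by positivity),
            pvBlock_shift c _ _ (by positivity),
            pvBlock_shift d _ _ (by positivity)]
      rw [htail, ih rest hr]
      rfl

theorem pv_loop_eq_chunks (pad : List Int) (hmod : pad.length % 4 = 0) :
    (PySem.List.pyRange 0 (pad.length : Int) 4).foldl
        (fun encoded i => encoded ++ pvBlock pad i) [] = encodeChunks pad := by
  rw [PySem.List.foldl_append_eq_flatMap, List.nil_append,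
      PySem.List.pyRange_of_pos 0 (pad.length : Int) (by norm_num)]
  by_cases h0 : pad = []
  · subst h0; rfl
  · have hlen : 0 < pad.length := List.length_pos_iff.mpr h0
    obtain ⟨n, hn⟩ : ∃ n, pad.length = 4 * n := ⟨pad.length / 4, by omega⟩
    have hif : (0 : Int) < (pad.length : Int) := by exact_mod_cast hlen
    rw [if_pos hif]
    have hcount : ((((pad.length : Int)) - 0 + 4 - 1) / 4).toNat = n := by
      have hc : ((pad.length : Int)) = 4 * (n : Int) := by exact_mod_cast hn
      rw [hc]; omega
    rw [hcount]
    exact pv_flatMap_chunks n pad hn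

-- ===== VERDICT (by name: the statement is the Claim_ definition above) =====
theorem hamming74_encode_spec : Claim_equal_hamming74_encode := by
  intro bits _
  unfold Spec_hamming74_encode hamming74_encode hamming74_encode_alt
  have hmod :
      (if bits.length % 4 ≠ 0 then bits ++ List.replicate (4 - bits.length % 4) 0
       else bits).length % 4 = 0 := by
    split_ifs with h
    · simp [List.length_append]; omega
    · omega
  exact pv_loop_eq_chunks _ hmod
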